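-- pv_equiv track=rewrite | github.com/StepDan23/MADE_algorithms | hw_6/a.py | first_positive
-- ===== SOURCE A (Python) =====
-- def first_positive(arr):
--     """ Return first positive or maximum of negative value """
--     max_ind = 0
--     i = 0
--     while i < len(arr):
--         if arr[i] >= 0:
--             return i
--         if arr[i] > arr[max_ind]:
--             max_ind = i
--         i += 1
--     return max_ind
-- ===== SOURCE B (Python) =====
-- def first_positive(arr):
--     """ Return first positive or maximum of negative value """
--     for i, x in enumerate(arr):
--         if x >= 0:
--             return i
--     if not arr:
--         return 0
--     best = 0
--     for j in range(1, len(arr)):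
--         if arr[j] > arr[best]:
--             best = j
--     return best
-- ===== Notes on version B (the rewrite author's own statement) =====
-- stated objective: alternative
-- what changed: A's single fused while-loop (tracking a running argmax while scanning for the first non-negative element) is split into two separate passes: a find-first-non-negative scan over enumerate(arr), then, only if all elements are negative, a standalone argmax loop over indices 1..len-1.
import Mathlib
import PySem

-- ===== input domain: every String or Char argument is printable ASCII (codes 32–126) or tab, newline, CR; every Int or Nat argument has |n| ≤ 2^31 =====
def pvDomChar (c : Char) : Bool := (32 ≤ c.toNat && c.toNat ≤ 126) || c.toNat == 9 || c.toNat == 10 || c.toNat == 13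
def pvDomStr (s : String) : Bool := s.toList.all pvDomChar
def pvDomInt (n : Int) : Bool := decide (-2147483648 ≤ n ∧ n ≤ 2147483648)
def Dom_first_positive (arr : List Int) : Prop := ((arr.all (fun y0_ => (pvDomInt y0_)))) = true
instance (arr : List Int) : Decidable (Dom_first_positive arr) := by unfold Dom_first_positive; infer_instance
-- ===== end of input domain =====

-- B splits A's single fused loop into a find-first-non-negative pass and a separate argmax pass (objective: alternative decomposition, same O(n) cost).

-- ===== PORT A =====
-- A's while-loop: scan from index i, return i at the first non-negative element,
-- otherwise maintain the running argmax max_ind; return max_ind at the end.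
def firstPosLoopA (arr : List Int) (i maxInd : Nat) : Int :=
  if h : i < arr.length then
    if arr.getD i 0 ≥ 0 then (i : Int)
    else firstPosLoopA arr (i + 1) (if arr.getD i 0 > arr.getD maxInd 0 then i else maxInd)
  else (maxInd : Int)
termination_by arr.length - i
decreasing_by omega

def first_positive (arr : List Int) : Int := firstPosLoopA arr 0 0

-- ===== PORT B =====
-- pass 1: first index whose element is ≥ 0 (the enumerate loop)
def findNonnegB : List Int → Nat → Option Nat
  | [], _ => none
  | x :: xs, i => if x ≥ 0 then some i else findNonnegB xs (i + 1)

-- pass 2: argmax loop over indices j = 1 .. len-1, strict '>' keeps the first maximum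
def argmaxLoopB (arr : List Int) (j best : Nat) : Nat :=
  if h : j < arr.length then
    argmaxLoopB arr (j + 1) (if arr.getD j 0 > arr.getD best 0 then j else best)
  else best
termination_by arr.length - j
decreasing_by omega

def first_positive_alt (arr : List Int) : Int :=
  match findNonnegB arr 0 with
  | some i => (i : Int)
  | none => if arr = [] then 0 else (argmaxLoopB arr 1 0 : Int)

-- ===== PRECONDITION & SPEC =====
def Spec_first_positive (arr : List Int) (out : Int) : Prop := out = first_positive_alt arr
instance (arr : List Int) (out : Int) : Decidable (Spec_first_positive arr out) := by unfold Spec_first_positive; infer_instance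

-- ===== CLAIM (what is proved, stated in full; the proofs are below) =====
def Claim_equal_first_positive : Prop := ∀ (arr : List Int), Dom_first_positive arr → Spec_first_positive arr (first_positive arr)

-- ===== LEMMAS AND PROOFS =====

-- A's fused loop from position i equals: first non-negative index in the suffix if any,
-- else the argmax loop continued from the same state.
theorem loopA_eq (arr : List Int) (i maxInd : Nat) :
    firstPosLoopA arr i maxInd =
      match findNonnegB (arr.drop i) i with
      | some k => (k : Int)
      | none => (argmaxLoopB arr i maxInd : Int) := by
  by_cases h : i < arr.length
  · have hdrop : arr.drop i = arr[i] :: arr.drop (i + 1) := List.drop_eq_getElem_cons h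
    have hg : arr.getD i 0 = arr[i] := List.getD_eq_getElem arr 0 h
    rw [firstPosLoopA, hdrop]
    simp only [findNonnegB, dif_pos h, ← hg]
    by_cases hpos : arr.getD i 0 ≥ 0
    · rw [if_pos hpos, if_pos hpos]
    · rw [if_neg hpos, if_neg hpos,
        loopA_eq arr (i + 1) (if arr.getD i 0 > arr.getD maxInd 0 then i else maxInd)]
      cases hf : findNonnegB (arr.drop (i + 1)) (i + 1) with
      | some k => rfl
      | none =>
        show _ = (argmaxLoopB arr i maxInd : Int)
        conv_rhs => rw [argmaxLoopB]
        rw [dif_pos h]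
  · have hnil : arr.drop i = [] := List.drop_eq_nil_of_le (by omega)
    rw [firstPosLoopA, argmaxLoopB, hnil]
    simp [h, findNonnegB]
termination_by arr.length - i
decreasing_by omega

theorem argmax_first_step (arr : List Int) (h : arr ≠ []) :
    argmaxLoopB arr 0 0 = argmaxLoopB arr 1 0 := by
  rw [argmaxLoopB]
  have hl : 0 < arr.length := List.length_pos_iff.mpr h
  simp [hl]

-- ===== VERDICT (by name: the statement is the Claim_ definition above) =====
theorem first_positive_spec : Claim_equal_first_positive := by
  intro arr _
  unfold Spec_first_positive first_positive first_positive_alt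
  rw [loopA_eq arr 0 0]
  cases arr with
  | nil => simp [findNonnegB, argmaxLoopB]
  | cons a l =>
    cases hf : findNonnegB (a :: l) 0 with
    | some k => simp [hf]
    | none =>
      simp only [List.drop_zero, hf]
      rw [argmax_first_step (a :: l) (by simp)]
      simp
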